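-- pv_equiv track=rewrite | github.com/prabhatsoni99/Lucidchart-to-Java | UML-to-Java.py | A_colon_B_to_B_A
-- ===== SOURCE A (Python) =====
-- def A_colon_B_to_B_A(string):
-- 	"""
-- 	Example:
-- 		progressPercentage : Double
-- 		becomes
-- 		Double progressPercentage
--
-- 	find last ':'
-- 	A : B
-- 	just make this as B A
-- 	"""
-- 	pos1 = string.rfind(":")
-- 	if(pos1!=-1):
-- 		string = string[pos1+1:] + string[:pos1]
--
--
-- 	start_bracket = string.find("(")
-- 	end_bracket = string.find(")")
-- 	if(start_bracket > -1 and end_bracket > -1):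
-- 		corrected_within_brackets = A_colon_B_to_B_A(string[start_bracket+1:end_bracket].strip())
-- 		# string is currently like : 		datatype funcname( <erroneous> )
-- 		string = string[:start_bracket] + "( " + corrected_within_brackets.strip() + " )"
--
-- 	return string
-- ===== SOURCE B (Python) =====
-- def A_colon_B_to_B_A(string):
--     # Iterative: peel bracket layers into a prefix list, then fold them back.
--     prefixes = []
--     cur = string
--     while True:
--         pos = cur.rfind(":")
--         if pos != -1:
--             cur = cur[pos+1:] + cur[:pos]
--         start = cur.find("(")
--         end = cur.find(")")
--         if start > -1 and end > -1:
--             prefixes.append(cur[:start] + "( ")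
--             cur = cur[start+1:end].strip()
--         else:
--             break
--     for p in reversed(prefixes):
--         cur = p + cur.strip() + " )"
--     return cur
-- ===== Notes on version B (the rewrite author's own statement) =====
-- stated objective: alternative
-- what changed: Replaced A's self-recursion inside brackets by an explicit loop that peels bracket layers into a saved prefix list and then folds the prefixes back right-to-left.
import Mathlib
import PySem

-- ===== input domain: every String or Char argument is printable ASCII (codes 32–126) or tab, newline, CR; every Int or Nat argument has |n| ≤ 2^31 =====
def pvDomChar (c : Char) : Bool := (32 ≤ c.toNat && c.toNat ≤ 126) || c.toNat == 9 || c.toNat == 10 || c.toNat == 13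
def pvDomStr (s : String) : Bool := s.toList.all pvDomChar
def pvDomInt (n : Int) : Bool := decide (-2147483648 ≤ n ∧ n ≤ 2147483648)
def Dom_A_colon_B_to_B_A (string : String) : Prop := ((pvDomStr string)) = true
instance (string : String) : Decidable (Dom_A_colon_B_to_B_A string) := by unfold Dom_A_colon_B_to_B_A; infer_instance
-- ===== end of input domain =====

-- B replaces A's recursion with an explicit loop that saves each bracket prefix and
-- folds them back afterwards (same cost; objective: alternative decomposition).

-- ===== PORT A =====
-- A's recursion, on List Char; fuel = length + 1 bounds the recursion depth
-- (each recursive call is on a strictly shorter string), used only for totality.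
def pvArec : Nat → List Char → List Char
  | 0, s => s
  | n+1, s =>
    let pos1 := PySem.Chars.rfind s [':']
    let s1 := if pos1 ≠ -1 then
        PySem.List.slice s (some (pos1+1)) none ++ PySem.List.slice s none (some pos1)
      else s
    let sb := PySem.Chars.find s1 ['(']
    let eb := PySem.Chars.find s1 [')']
    if sb > -1 ∧ eb > -1 then
      let inner := PySem.Chars.strip (PySem.List.slice s1 (some (sb+1)) (some eb))
      PySem.List.slice s1 none (some sb) ++ ('(' :: ' ' :: []) ++
        PySem.Chars.strip (pvArec n inner) ++ (' ' :: ')' :: [])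
    else s1

def A_colon_B_to_B_A (string : String) : String :=
  String.ofList (pvArec (string.toList.length + 1) string.toList)

-- ===== PORT B =====
-- the loop body: colon swap, then either push a prefix and descend, or stop
def pvBloop : Nat → List (List Char) → List Char → (List (List Char) × List Char)
  | 0, ps, s => (ps, s)
  | n+1, ps, s =>
    let pos := PySem.Chars.rfind s [':']
    let cur := if pos ≠ -1 then
        PySem.List.slice s (some (pos+1)) none ++ PySem.List.slice s none (some pos)
      else s
    let start := PySem.Chars.find cur ['(']
    let stop := PySem.Chars.find cur [')']
    if start > -1 ∧ stop > -1 then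
      pvBloop n (ps ++ [PySem.List.slice cur none (some start) ++ ('(' :: ' ' :: [])])
        (PySem.Chars.strip (PySem.List.slice cur (some (start+1)) (some stop)))
    else (ps, cur)

def A_colon_B_to_B_A_alt (string : String) : String :=
  let r := pvBloop (string.toList.length + 1) [] string.toList
  String.ofList (r.1.reverse.foldl
    (fun cur p => p ++ PySem.Chars.strip cur ++ (' ' :: ')' :: [])) r.2)

-- ===== PRECONDITION & SPEC =====
def Spec_A_colon_B_to_B_A (string : String) (out : String) : Prop := out = A_colon_B_to_B_A_alt string
instance (string : String) (out : String) : Decidable (Spec_A_colon_B_to_B_A string out) := by unfold Spec_A_colon_B_to_B_A; infer_instance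

-- ===== CLAIM (what is proved, stated in full; the proofs are below) =====
def Claim_equal_A_colon_B_to_B_A : Prop := ∀ (string : String), Dom_A_colon_B_to_B_A string → Spec_A_colon_B_to_B_A string (A_colon_B_to_B_A string)

-- ===== LEMMAS AND PROOFS =====

-- applying the saved prefixes back, right to left (B's final fold)
def pvApply (ps : List (List Char)) (cur : List Char) : List Char :=
  ps.reverse.foldl (fun cur p => p ++ PySem.Chars.strip cur ++ (' ' :: ')' :: [])) cur

theorem pvApply_append (ps : List (List Char)) (p cur : List Char) :
    pvApply (ps ++ [p]) cur = pvApply ps (p ++ PySem.Chars.strip cur ++ (' ' :: ')' :: [])) := by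
  simp [pvApply]

-- the loop-with-accumulator equals the recursion under the pending prefixes, for every fuel
theorem pvBloop_eq_apply_arec (n : Nat) : ∀ (ps : List (List Char)) (s : List Char),
    pvApply (pvBloop n ps s).1 (pvBloop n ps s).2 = pvApply ps (pvArec n s) := by
  induction n with
  | zero => intro ps s; rfl
  | succ n ih =>
    intro ps s
    simp only [pvBloop, pvArec]
    generalize (if PySem.Chars.rfind s [':'] ≠ -1 then
        PySem.List.slice s (some (PySem.Chars.rfind s [':'] + 1)) none ++
          PySem.List.slice s none (some (PySem.Chars.rfind s [':']))
      else s) = s1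
    split_ifs with h
    · rw [ih, pvApply_append]
    · rfl

-- ===== VERDICT (by name: the statement is the Claim_ definition above) =====
theorem A_colon_B_to_B_A_spec : Claim_equal_A_colon_B_to_B_A := by
  intro s _
  show _ = _
  have h := pvBloop_eq_apply_arec (s.toList.length + 1) [] s.toList
  simp only [pvApply, List.reverse_nil, List.foldl_nil] at h
  simp only [A_colon_B_to_B_A, A_colon_B_to_B_A_alt, ← h]
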